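-- pv_equiv track=rewrite | github.com/myeongjunkim/Algorithm | 프로그래머스/Lv.4/118670. 행렬과 연산/행렬과 연산.py | solution
-- ===== SOURCE A (Python) =====
-- from collections import deque
--
-- def solution(rc, operations):
--     R, C = len(rc), len(rc[0])
--
--     middle_row = deque( deque(row[1:-1]) for row in rc   )
--     left_col = deque( row[0] for row in rc )
--     right_col = deque( row[C-1] for row in rc )
--
--
--     for op in operations:
--         if op[0] == "S":
--             left_col.appendleft(left_col.pop())
--             middle_row.appendleft(middle_row.pop())
--             right_col.appendleft(right_col.pop())
--         else:
--             right_bottom = right_col.pop()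
--             middle_row[R-1].append(right_bottom)
--
--             bottom_left = middle_row[R-1].popleft()
--             left_col.append(bottom_left)
--
--             right_top = left_col.popleft()
--             middle_row[0].appendleft(right_top)
--
--             top_right = middle_row[0].pop()
--             right_col.appendleft(top_right)
--
--
--
--
--     result = []
--     for i in range(R):
--         line = [left_col[i]] + list(middle_row[i]) + [right_col[i]]
--         result.append(line)
--
--     return result
-- ===== SOURCE B (Python) =====
-- def solution(rc, operations):
--     mat = [list(row) for row in rc]
--     for op in operations:
--         if op[0] == "S":
--             mat = [mat[-1]] + mat[:-1]
--         else:
--             top = mat[0]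
--             mids = mat[1:-1]
--             bottom = mat[-1]
--             # clockwise border sequence, rotated one step clockwise
--             border = top + [r[-1] for r in mids] + bottom[::-1] + [r[0] for r in reversed(mids)]
--             border = [border[-1]] + border[:-1]
--             C = len(top)
--             k = len(mids)
--             new_top = border[:C]
--             rest = border[C:]
--             right_mid = rest[:k]
--             new_bottom = rest[k:k + C][::-1]
--             left_mid = rest[k + C:][::-1]
--             new_mids = [[l] + r[1:-1] + [rr] for l, r, rr in zip(left_mid, mids, right_mid)]
--             mat = [new_top] + new_mids + [new_bottom]
--     return mat
-- ===== Notes on version B (the rewrite author's own statement) =====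
-- stated objective: simpler
-- what changed: B keeps the whole matrix as a plain list of rows and implements 'R' by extracting the clockwise border sequence, rotating it one position and writing it back, instead of A's three synchronised deques (left column, middle rows, right column) updated by four pop/append hand-offs.
-- outside the precondition, e.g. on solution([[1], [2], [3]], ['R']): A returns [[2, 1], [3, 1], [3, 2]], B returns [[2], [3, 1], [2]]; on solution([[1, 2, 3]], ['R']): A returns [[2, 1, 3]], B returns [[1, 1, 2], [2, 3, 3]]; on solution([[1, 2], [3, 4, 5]], ['R']): A returns [[3, 1], [4, 4, 2]], B returns [[3, 1], [5, 2]]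
import Mathlib
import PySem

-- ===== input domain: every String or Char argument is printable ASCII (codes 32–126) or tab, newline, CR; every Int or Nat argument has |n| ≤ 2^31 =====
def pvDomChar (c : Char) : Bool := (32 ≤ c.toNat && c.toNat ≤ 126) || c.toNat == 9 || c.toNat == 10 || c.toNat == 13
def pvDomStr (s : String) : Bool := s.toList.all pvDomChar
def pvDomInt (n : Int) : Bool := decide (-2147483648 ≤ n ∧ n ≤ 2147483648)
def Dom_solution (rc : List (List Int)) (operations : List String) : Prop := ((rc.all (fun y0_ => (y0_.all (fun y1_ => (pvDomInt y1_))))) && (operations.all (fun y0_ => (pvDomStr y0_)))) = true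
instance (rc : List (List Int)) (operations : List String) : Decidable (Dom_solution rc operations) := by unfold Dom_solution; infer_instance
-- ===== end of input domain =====

-- B keeps the whole matrix as a plain list of rows and implements 'R' by rotating the clockwise
-- border sequence in one pass, instead of A's three synchronised deques (left column / middle
-- rows / right column); objective: simpler. Neither implementation mutates rc.

-- ===== PORT A =====
-- deque.appendleft(deque.pop()): move the last element to the front (deques are nonempty on Pre_)
def pvRotR {α : Type} (l : List α) : List α :=
  match l.getLast? with
  | none => l
  | some x => x :: l.dropLast

-- one iteration of A's `for op in operations` loop over the state (left_col, middle_row, right_col)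
def pvStepA (Rn : Nat) (st : List Int × List (List Int) × List Int) (op : String) :
    List Int × List (List Int) × List Int :=
  if PySem.Str.pyGet? op 0 = some 'S' then
    (pvRotR st.1, pvRotR st.2.1, pvRotR st.2.2)
  else
    let rb := st.2.2.getLastD 0                                  -- right_col.pop()
    let rg1 := st.2.2.dropLast
    let m1 := st.2.1.set (Rn - 1) (st.2.1.getD (Rn - 1) [] ++ [rb])  -- middle_row[R-1].append(...)
    let bl := (m1.getD (Rn - 1) []).headD 0                      -- middle_row[R-1].popleft()
    let m2 := m1.set (Rn - 1) (m1.getD (Rn - 1) []).tail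
    let l1 := st.1 ++ [bl]                                       -- left_col.append(bl)
    let rt := l1.headD 0                                         -- left_col.popleft()
    let l2 := l1.tail
    let m3 := m2.set 0 (rt :: m2.getD 0 [])                      -- middle_row[0].appendleft(rt)
    let tr := (m3.getD 0 []).getLastD 0                          -- middle_row[0].pop()
    let m4 := m3.set 0 (m3.getD 0 []).dropLast
    (l2, m4, tr :: rg1)                                          -- right_col.appendleft(tr)

def solution (rc : List (List Int)) (operations : List String) : List (List Int) :=
  let Rn := rc.length
  let Cn := (rc.headD []).length                                 -- rc[0] (nonempty on Pre_)
  let middle := rc.map (fun row => PySem.List.slice row (some 1) (some (-1)))   -- row[1:-1]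
  let leftCol := rc.map (fun row => PySem.List.pyGetD row 0 0)                  -- row[0]
  let rightCol := rc.map (fun row => PySem.List.pyGetD row ((Cn : Int) - 1) 0)  -- row[C-1]
  let st := operations.foldl (pvStepA Rn) (leftCol, middle, rightCol)
  (List.range Rn).map (fun i => st.1.getD i 0 :: (st.2.1.getD i [] ++ [st.2.2.getD i 0]))

-- ===== PORT B =====
-- the else-branch of B's loop: rotate the clockwise border sequence one step
def pvStepBR (mat : List (List Int)) : List (List Int) :=
  let top := PySem.List.pyGetD mat 0 []                          -- mat[0]
  let mids := PySem.List.slice mat (some 1) (some (-1))          -- mat[1:-1]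
  let bottom := PySem.List.pyGetD mat (-1) []                    -- mat[-1]
  -- border = top + [r[-1] for r in mids] + bottom[::-1] + [r[0] for r in reversed(mids)]
  -- ([::-1] and reversed(…) are List.reverse, cf. PySem.List.slice?_none_none_neg_one)
  let border := top ++ mids.map (fun r => PySem.List.pyGetD r (-1) 0)
      ++ bottom.reverse ++ mids.reverse.map (fun r => PySem.List.pyGetD r 0 0)
  let border1 := PySem.List.pyGetD border (-1) 0 :: PySem.List.slice border none (some (-1))
  let c := top.length
  let k := mids.length
  let newTop := PySem.List.slice border1 none (some (c : Int))          -- border[:C]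
  let rest := PySem.List.slice border1 (some (c : Int)) none            -- border[C:]
  let rightMid := PySem.List.slice rest none (some (k : Int))           -- rest[:k]
  let newBottom := (PySem.List.slice rest (some (k : Int)) (some ((k : Int) + (c : Int)))).reverse
  let leftMid := (PySem.List.slice rest (some ((k : Int) + (c : Int))) none).reverse
  let newMids := List.zipWith3
      (fun l r rr => l :: (PySem.List.slice r (some 1) (some (-1)) ++ [rr])) leftMid mids rightMid
  newTop :: (newMids ++ [newBottom])

-- one iteration of B's loop over the matrix
def pvStepB (mat : List (List Int)) (op : String) : List (List Int) :=
  if PySem.Str.pyGet? op 0 = some 'S' then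
    PySem.List.pyGetD mat (-1) [] :: PySem.List.slice mat none (some (-1))   -- [mat[-1]] + mat[:-1]
  else
    pvStepBR mat

def solution_alt (rc : List (List Int)) (operations : List String) : List (List Int) :=
  -- mat = [list(row) for row in rc]: the copy is the identity on immutable Lean lists
  operations.foldl pvStepB (rc.map (fun row => row))

-- ===== PRECONDITION & SPEC =====
-- Pre_ is the problem's stated domain: a rectangular matrix with at least 2 rows and 2 columns
-- and nonempty operation strings (a single-row matrix is also admitted under shift-only
-- operations, where both programs leave it unchanged).  It excludes (a) empty operation
-- strings, on which A raises IndexError, and (b) single-column and ragged matrices, and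
-- single-row matrices under a rotate, on which A's deque decomposition returns degenerate
-- values (doubled cells, mixed-length or reshuffled rows) that are accidents of its
-- implementation and that no whole-matrix border rotation would produce.
def Pre_solution (rc : List (List Int)) (operations : List String) : Prop :=
  2 ≤ (rc.headD []).length ∧ (∀ row ∈ rc, row.length = (rc.headD []).length) ∧
    (∀ op ∈ operations, op ≠ "") ∧
    (2 ≤ rc.length ∨
      (rc.length = 1 ∧ ∀ op ∈ operations, PySem.Str.pyGet? op 0 = some 'S'))
instance (rc : List (List Int)) (operations : List String) : Decidable (Pre_solution rc operations) := by
  unfold Pre_solution; infer_instance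

def pvWitness_solution : List (List Int) × List String := ([[1, 2], [3, 4]], ["S", "R"])

def Spec_solution (rc : List (List Int)) (operations : List String) (out : List (List Int)) : Prop := out = solution_alt rc operations
instance (rc : List (List Int)) (operations : List String) (out : List (List Int)) : Decidable (Spec_solution rc operations out) := by unfold Spec_solution; infer_instance

-- ===== CLAIM (what is proved, stated in full; the proofs are below) =====
def Claim_equal_solution : Prop := ∀ (rc : List (List Int)) (operations : List String), Dom_solution rc operations → Pre_solution rc operations → Spec_solution rc operations (solution rc operations)

-- ===== LEMMAS AND PROOFS =====

-- the three components of A's state, read off a matrix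
def pvH1 (r : List Int) : Int := r.headD 0
def pvH2 (r : List Int) : List Int := r.tail.dropLast
def pvH3 (r : List Int) : Int := r.getLastD 0
def pvDecomp (mat : List (List Int)) : List Int × List (List Int) × List Int :=
  (mat.map pvH1, mat.map pvH2, mat.map pvH3)
def pvRect (mat : List (List Int)) (C : Nat) : Prop := ∀ r ∈ mat, r.length = C

lemma pvGetD_zero_headD (l : List Int) (d : Int) : l.getD 0 d = l.headD d := by cases l <;> rfl

lemma pvGetD_last (X : List (List Int)) (y d : List Int) : (X ++ [y]).getD X.length d = y := by
  simp [List.getD]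

lemma pvSet_last (X : List (List Int)) (y z : List Int) : (X ++ [y]).set X.length z = X ++ [z] := by
  induction X with
  | nil => rfl
  | cons a l ih => simp [ih]

lemma pvGetLastD_ne (l : List Int) (h : l ≠ []) (d1 d2 : Int) : l.getLastD d1 = l.getLastD d2 := by
  cases l with
  | nil => simp at h
  | cons a m => rw [List.getLastD_cons, List.getLastD_cons]

lemma pvHeadD_cons_tail (r : List Int) (h : r ≠ []) : r.headD 0 :: r.tail = r := by
  cases r with
  | nil => simp at h
  | cons a m => rfl

lemma pvHeadD_append (l l2 : List Int) (h : l ≠ []) (d : Int) : (l ++ l2).headD d = l.headD d := by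
  cases l with
  | nil => simp at h
  | cons a m => rfl

lemma pvTail_append (l l2 : List Int) (h : l ≠ []) : (l ++ l2).tail = l.tail ++ l2 := by
  cases l with
  | nil => simp at h
  | cons a m => rfl

lemma pvHead_cons_tail_dropLast (t : List Int) (h : 2 ≤ t.length) :
    t.headD 0 :: t.tail.dropLast = t.dropLast := by
  cases t with
  | nil => simp at h
  | cons a l => cases l <;> simp_all [List.dropLast]

lemma pvTail_dropLast_getLastD (t : List Int) (h : 2 ≤ t.length) :
    t.tail.dropLast ++ [t.getLastD 0] = t.tail := by
  cases t with
  | nil => simp at h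
  | cons a l =>
    cases l with
    | nil => simp at h
    | cons b m =>
      simp [List.getLastD_eq_getLast?, List.getLast?_eq_some_getLast, List.dropLast_append_getLast]

lemma pvDropLast_getLastD (l : List Int) (h : l ≠ []) :
    l.dropLast ++ [l.getLastD 0] = l := by
  cases l with
  | nil => simp at h
  | cons a m =>
    simp [List.getLastD_eq_getLast?, List.getLast?_eq_some_getLast, List.dropLast_append_getLast]

lemma pvDrop_len_sub_one (l : List Int) (h : l ≠ []) : l.drop (l.length - 1) = [l.getLastD 0] := by
  induction l with
  | nil => simp at h
  | cons a m ih =>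
    cases m with
    | nil => simp
    | cons b m' =>
      have h2 : (b :: m') ≠ [] := by simp
      have := ih h2
      simp only [List.length_cons] at this ⊢
      rw [show m'.length + 1 + 1 - 1 = (m'.length + 1 - 1) + 1 by omega, List.drop_succ_cons, this]
      simp [List.getLastD_cons]

lemma pvGetD_len_sub_one (l : List Int) (h : l ≠ []) : l.getD (l.length - 1) 0 = l.getLastD 0 := by
  induction l with
  | nil => simp at h
  | cons a m ih =>
    cases m with
    | nil => simp
    | cons b m' =>
      have h2 : (b :: m') ≠ [] := by simp
      have := ih h2
      simp only [List.length_cons] at this ⊢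
      rw [show m'.length + 1 + 1 - 1 = (m'.length + 1 - 1) + 1 by omega, List.getD_cons_succ, this]
      simp [List.getLastD_cons]

lemma pvGetLastD_reverse (l : List Int) (d : Int) : l.reverse.getLastD d = l.headD d := by
  cases l with
  | nil => rfl
  | cons a m => simp [List.reverse_cons, List.getLastD_concat]

lemma pvSlice_mid (xs : List Int) : PySem.List.slice xs (some 1) (some (-1)) = xs.tail.dropLast := by
  cases xs with
  | nil => simp [PySem.List.slice]
  | cons a l =>
    simp only [PySem.List.slice, PySem.List.clampIdx_neg_one]
    rw [show (1 : Int) = ((1 : Nat) : Int) from rfl, PySem.List.clampIdx_natCast]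
    rw [show min (1 : Nat) (a :: l).length = 1 by simp]
    simp [List.dropLast_eq_take]

lemma pvSliceL_mid (xs : List (List Int)) :
    PySem.List.slice xs (some 1) (some (-1)) = xs.tail.dropLast := by
  cases xs with
  | nil => simp [PySem.List.slice]
  | cons a l =>
    simp only [PySem.List.slice, PySem.List.clampIdx_neg_one]
    rw [show (1 : Int) = ((1 : Nat) : Int) from rfl, PySem.List.clampIdx_natCast]
    rw [show min (1 : Nat) (a :: l).length = 1 by simp]
    simp [List.dropLast_eq_take]

lemma pvPyGetD_neg_one (r : List Int) (h : r ≠ []) : PySem.List.pyGetD r (-1) 0 = r.getLastD 0 := by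
  rw [PySem.List.pyGetD_neg_one r 0 h, List.getLastD_eq_getLast?, List.getLast?_eq_some_getLast h]
  rfl

lemma pvPyGetD_zero (r : List Int) : PySem.List.pyGetD r 0 0 = r.headD 0 := by
  rw [PySem.List.pyGetD_zero, pvGetD_zero_headD]

lemma pvRotR_map {α β : Type} (f : α → β) (l : List α) :
    pvRotR (l.map f) = (pvRotR l).map f := by
  unfold pvRotR
  rw [List.getLast?_map]
  cases h : l.getLast? <;> simp [List.map_dropLast]

lemma pvRotR_length {α : Type} (l : List α) : (pvRotR l).length = l.length := by
  unfold pvRotR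
  cases h : l.getLast? with
  | none => rfl
  | some x =>
    cases l with
    | nil => simp at h
    | cons a m => simp

lemma pvRotR_mem {α : Type} (l : List α) (x : α) (hx : x ∈ pvRotR l) : x ∈ l := by
  unfold pvRotR at hx
  cases h : l.getLast? with
  | none => rw [h] at hx; exact hx
  | some y =>
    rw [h] at hx
    rcases List.mem_cons.mp hx with rfl | hm
    · exact List.mem_of_getLast? h
    · exact List.mem_of_mem_dropLast hm

-- A's and B's `S` steps agree
lemma pvStepS_eq (mat : List (List Int)) (h : mat ≠ []) :
    PySem.List.pyGetD mat (-1) [] :: PySem.List.slice mat none (some (-1)) = pvRotR mat := by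
  rw [PySem.List.pyGetD_neg_one mat [] h, PySem.List.slice_to_neg_one]
  unfold pvRotR
  rw [List.getLast?_eq_some_getLast h]

-- explicit value of B's rotate step on a two-row matrix
lemma pvStepBR_nil (t b : List Int) (C : Nat) (hC : 2 ≤ C) (ht : t.length = C) (hb : b.length = C) :
    pvStepBR [t, b] = [b.headD 0 :: t.dropLast, b.tail ++ [t.getLastD 0]] := by
  have htne : t ≠ [] := by intro h; rw [h] at ht; simp at ht; omega
  have hbne : b ≠ [] := by intro h; rw [h] at hb; simp at hb; omega
  have e_top : PySem.List.pyGetD [t, b] 0 [] = t := by rw [PySem.List.pyGetD_zero]; rfl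
  have e_mids : PySem.List.slice [t, b] (some 1) (some (-1)) = ([] : List (List Int)) := by
    rw [pvSliceL_mid]; rfl
  have e_bot : PySem.List.pyGetD [t, b] (-1) [] = b := by
    rw [show [t, b] = [t] ++ [b] by rfl, PySem.List.pyGetD_neg_one_append_singleton]
  simp only [pvStepBR, e_top, e_mids, e_bot, List.map_nil, List.reverse_nil, List.append_nil,
    List.nil_append, List.length_nil]
  obtain ⟨br', bh, hbrev⟩ : ∃ l x, b.reverse = l ++ [x] := by
    rcases List.eq_nil_or_concat b.reverse with h | ⟨l, x, h⟩
    · exact absurd (by simpa using h) hbne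
    · exact ⟨l, x, by rw [h, List.concat_eq_append]⟩
  have hbh : bh = b.headD 0 := by
    have h1 := pvGetLastD_reverse b 0
    rw [hbrev, List.getLastD_concat] at h1
    exact h1
  have hbr' : br' = b.tail.reverse := by
    have h1 : b.reverse.dropLast = br' := by rw [hbrev, List.dropLast_concat]
    rw [List.dropLast_reverse] at h1
    exact h1.symm
  have e_g : PySem.List.pyGetD (t ++ b.reverse) (-1) 0 = b.headD 0 := by
    rw [hbrev, ← List.append_assoc, PySem.List.pyGetD_neg_one_append_singleton, hbh]
  have e_dl : PySem.List.slice (t ++ b.reverse) none (some (-1)) = t ++ b.tail.reverse := by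
    rw [PySem.List.slice_to_neg_one, hbrev, ← List.append_assoc, List.dropLast_concat, hbr']
  rw [e_g, e_dl]
  have e_newTop : PySem.List.slice (b.headD 0 :: (t ++ b.tail.reverse)) none (some (t.length : Int))
      = b.headD 0 :: t.dropLast := by
    rw [PySem.List.slice_to_natCast, show t.length = (t.length - 1) + 1 by omega,
      List.take_succ_cons, List.take_append_of_le_length (by omega), ← List.dropLast_eq_take]
  have e_rest : PySem.List.slice (b.headD 0 :: (t ++ b.tail.reverse)) (some (t.length : Int)) none
      = t.getLastD 0 :: b.tail.reverse := by
    rw [PySem.List.slice_from_natCast, show t.length = (t.length - 1) + 1 by omega,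
      List.drop_succ_cons, List.drop_append_of_le_length (by omega), pvDrop_len_sub_one t htne]
    rfl
  rw [e_newTop, e_rest]
  have hlen2 : (t.getLastD 0 :: b.tail.reverse).length ≤ t.length := by
    rw [List.length_cons, List.length_reverse, List.length_tail, hb, ht]
    omega
  have e_rm : PySem.List.slice (t.getLastD 0 :: b.tail.reverse) none (some ((0 : Nat) : Int))
      = ([] : List Int) := by
    rw [PySem.List.slice_to_natCast]; rfl
  have e_nb : PySem.List.slice (t.getLastD 0 :: b.tail.reverse) (some ((0 : Nat) : Int))
      (some (((0 : Nat) : Int) + (t.length : Int))) = t.getLastD 0 :: b.tail.reverse := by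
    rw [PySem.List.slice_natCast_add, List.drop_zero, List.take_of_length_le hlen2]
  have e_lm : PySem.List.slice (t.getLastD 0 :: b.tail.reverse)
      (some (((0 : Nat) : Int) + (t.length : Int))) none = ([] : List Int) := by
    rw [show ((0 : Nat) : Int) + (t.length : Int) = ((t.length : Nat) : Int) by push_cast; ring,
      PySem.List.slice_from_natCast]
    rw [List.drop_eq_nil_iff]
    exact hlen2
  rw [e_rm, e_nb, e_lm]
  simp [List.reverse_cons, List.reverse_reverse, List.zipWith3]

-- explicit value of B's rotate step on a matrix with at least one middle row
lemma pvStepBR_cons (t m b : List Int) (ms' : List (List Int)) (C : Nat) (hC : 2 ≤ C)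
    (ht : t.length = C) (hm : m.length = C) (hb : b.length = C)
    (hms' : ∀ r ∈ ms', r.length = C) :
    pvStepBR (t :: ((m :: ms') ++ [b])) =
      (m.headD 0 :: t.dropLast)
        :: (List.zipWith3 (fun l r rr => l :: (PySem.List.slice r (some 1) (some (-1)) ++ [rr]))
              (ms'.map pvH1 ++ [b.headD 0]) (m :: ms')
              (t.getLastD 0 :: ((m :: ms').map pvH3).dropLast)
            ++ [b.tail ++ [((m :: ms').map pvH3).getLastD 0]]) := by
  have htne : t ≠ [] := by intro h; rw [h] at ht; simp at ht; omega
  have hbne : b ≠ [] := by intro h; rw [h] at hb; simp at hb; omega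
  have hrowne : ∀ r ∈ (m :: ms'), r ≠ [] := by
    intro r hr h
    rcases List.mem_cons.mp hr with rfl | hr'
    · rw [h] at hm; simp at hm; omega
    · have h2 := hms' _ hr'; rw [h] at h2; simp at h2; omega
  have e_top : PySem.List.pyGetD (t :: ((m :: ms') ++ [b])) 0 [] = t := by
    rw [PySem.List.pyGetD_zero]; rfl
  have e_mids : PySem.List.slice (t :: ((m :: ms') ++ [b])) (some 1) (some (-1)) = m :: ms' := by
    rw [pvSliceL_mid]
    rw [show (t :: ((m :: ms') ++ [b])).tail = (m :: ms') ++ [b] by rfl, List.dropLast_concat]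
  have e_bot : PySem.List.pyGetD (t :: ((m :: ms') ++ [b])) (-1) [] = b := by
    rw [show t :: ((m :: ms') ++ [b]) = (t :: m :: ms') ++ [b] by simp,
      PySem.List.pyGetD_neg_one_append_singleton]
  simp only [pvStepBR, e_top, e_mids, e_bot]
  have e_f3 : (m :: ms').map (fun r => PySem.List.pyGetD r (-1) 0) = (m :: ms').map pvH3 :=
    List.map_congr_left (fun r hr => pvPyGetD_neg_one r (hrowne r hr))
  have e_f1 : (m :: ms').reverse.map (fun r => PySem.List.pyGetD r 0 0)
      = (ms'.map pvH1).reverse ++ [pvH1 m] := by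
    rw [List.map_reverse, List.map_congr_left (fun r _ => pvPyGetD_zero r)]
    simp only [List.map_cons, List.reverse_cons]
    rfl
  rw [e_f3, e_f1]
  have hmapms_ne : ((m :: ms').map pvH3) ≠ [] := by simp
  have e_g : PySem.List.pyGetD
      (t ++ (m :: ms').map pvH3 ++ b.reverse ++ ((ms'.map pvH1).reverse ++ [pvH1 m])) (-1) 0
      = pvH1 m := by
    rw [show t ++ (m :: ms').map pvH3 ++ b.reverse ++ ((ms'.map pvH1).reverse ++ [pvH1 m])
        = (t ++ (m :: ms').map pvH3 ++ b.reverse ++ (ms'.map pvH1).reverse) ++ [pvH1 m] by simp,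
      PySem.List.pyGetD_neg_one_append_singleton]
  have e_dl : PySem.List.slice
      (t ++ (m :: ms').map pvH3 ++ b.reverse ++ ((ms'.map pvH1).reverse ++ [pvH1 m])) none
      (some (-1)) = t ++ ((m :: ms').map pvH3 ++ (b.reverse ++ (ms'.map pvH1).reverse)) := by
    rw [PySem.List.slice_to_neg_one,
      show t ++ (m :: ms').map pvH3 ++ b.reverse ++ ((ms'.map pvH1).reverse ++ [pvH1 m])
        = (t ++ ((m :: ms').map pvH3 ++ (b.reverse ++ (ms'.map pvH1).reverse))) ++ [pvH1 m] by simp,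
      List.dropLast_concat]
  rw [e_g, e_dl]
  have e_newTop : PySem.List.slice
      (pvH1 m :: (t ++ ((m :: ms').map pvH3 ++ (b.reverse ++ (ms'.map pvH1).reverse)))) none
      (some (t.length : Int)) = pvH1 m :: t.dropLast := by
    rw [PySem.List.slice_to_natCast, show t.length = (t.length - 1) + 1 by omega,
      List.take_succ_cons, List.take_append_of_le_length (by omega), ← List.dropLast_eq_take]
  have e_rest : PySem.List.slice
      (pvH1 m :: (t ++ ((m :: ms').map pvH3 ++ (b.reverse ++ (ms'.map pvH1).reverse))))
      (some (t.length : Int)) none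
      = t.getLastD 0 :: ((m :: ms').map pvH3 ++ (b.reverse ++ (ms'.map pvH1).reverse)) := by
    rw [PySem.List.slice_from_natCast, show t.length = (t.length - 1) + 1 by omega,
      List.drop_succ_cons, List.drop_append_of_le_length (by omega), pvDrop_len_sub_one t htne]
    rfl
  rw [e_newTop, e_rest]
  simp only [List.length_cons]
  have e_rm : PySem.List.slice
      (t.getLastD 0 :: ((m :: ms').map pvH3 ++ (b.reverse ++ (ms'.map pvH1).reverse))) none
      (some ((ms'.length + 1 : Nat) : Int))
      = t.getLastD 0 :: ((m :: ms').map pvH3).dropLast := by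
    rw [PySem.List.slice_to_natCast, List.take_succ_cons,
      List.take_append_of_le_length (by simp)]
    congr 1
    rw [List.dropLast_eq_take]
    congr 1
    simp
  have e_dropk : List.drop (ms'.length + 1)
      (t.getLastD 0 :: ((m :: ms').map pvH3 ++ (b.reverse ++ (ms'.map pvH1).reverse)))
      = ((m :: ms').map pvH3).getLastD 0 :: (b.reverse ++ (ms'.map pvH1).reverse) := by
    rw [List.drop_succ_cons, List.drop_append_of_le_length (by simp),
      show ms'.length = ((m :: ms').map pvH3).length - 1 by simp,
      pvDrop_len_sub_one ((m :: ms').map pvH3) hmapms_ne]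
    rfl
  have e_nb : (PySem.List.slice
      (t.getLastD 0 :: ((m :: ms').map pvH3 ++ (b.reverse ++ (ms'.map pvH1).reverse)))
      (some ((ms'.length + 1 : Nat) : Int))
      (some (((ms'.length + 1 : Nat) : Int) + (t.length : Int)))).reverse
      = b.tail ++ [((m :: ms').map pvH3).getLastD 0] := by
    rw [PySem.List.slice_natCast_add, e_dropk, show t.length = (t.length - 1) + 1 by omega,
      List.take_succ_cons, List.take_append_of_le_length (by simp; omega),
      show t.length - 1 = b.reverse.length - 1 by simp; omega,
      ← List.dropLast_eq_take, List.dropLast_reverse]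
    simp [List.reverse_cons, List.reverse_reverse]
  have e0 : List.drop (ms'.length + t.length) ((m :: ms').map pvH3) = [] := by
    rw [List.drop_eq_nil_iff]
    simp
    omega
  have e1 : List.drop (b.reverse.length - 1 - b.reverse.length) ((ms'.map pvH1).reverse)
      = (ms'.map pvH1).reverse := by
    rw [show b.reverse.length - 1 - b.reverse.length = 0 by omega, List.drop_zero]
  have e_lm : (PySem.List.slice
      (t.getLastD 0 :: ((m :: ms').map pvH3 ++ (b.reverse ++ (ms'.map pvH1).reverse)))
      (some (((ms'.length + 1 : Nat) : Int) + (t.length : Int))) none).reverse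
      = ms'.map pvH1 ++ [b.headD 0] := by
    rw [show ((ms'.length + 1 : Nat) : Int) + (t.length : Int)
        = ((ms'.length + 1 + t.length : Nat) : Int) by push_cast; ring,
      PySem.List.slice_from_natCast,
      show ms'.length + 1 + t.length = (ms'.length + t.length) + 1 by omega,
      List.drop_succ_cons, List.drop_append, e0,
      show ms'.length + t.length - ((m :: ms').map pvH3).length = b.reverse.length - 1 by
        simp; omega,
      List.drop_append, e1,
      pvDrop_len_sub_one b.reverse (by simp [hbne]), pvGetLastD_reverse]
    simp [List.reverse_append, List.reverse_reverse]
  rw [e_rm, e_nb, e_lm]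
  simp [pvH1]

-- explicit value of A's rotate step on the decomposition
lemma pvStepAR_eq (t b : List Int) (ms : List (List Int)) (C : Nat) (hC : 2 ≤ C)
    (ht : t.length = C) (hb : b.length = C) (op : String)
    (hop : ¬ PySem.Str.pyGet? op 0 = some 'S') :
    pvStepA (ms.length + 2) (pvDecomp (t :: (ms ++ [b]))) op =
      (ms.map pvH1 ++ [b.headD 0, b.tail.headD 0],
       t.dropLast.dropLast :: (ms.map pvH2 ++ [b.tail.tail]),
       t.dropLast.getLastD 0 :: t.getLastD 0 :: ms.map pvH3) := by
  have e_rb : (pvH3 t :: (ms.map pvH3 ++ [pvH3 b])).getLastD 0 = pvH3 b := by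
    rw [show pvH3 t :: (ms.map pvH3 ++ [pvH3 b]) = (pvH3 t :: ms.map pvH3) ++ [pvH3 b] by simp,
      List.getLastD_concat]
  have e_rg1 : (pvH3 t :: (ms.map pvH3 ++ [pvH3 b])).dropLast = pvH3 t :: ms.map pvH3 := by
    rw [show pvH3 t :: (ms.map pvH3 ++ [pvH3 b]) = (pvH3 t :: ms.map pvH3) ++ [pvH3 b] by simp,
      List.dropLast_concat]
  have e_getM : ∀ v : List Int,
      (pvH2 t :: (ms.map pvH2 ++ [v])).getD (ms.length + 1) [] = v := by
    intro v
    rw [List.getD_cons_succ, show ms.length = (ms.map pvH2).length by simp, pvGetD_last]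
  have e_setM : ∀ v : List Int,
      (pvH2 t :: (ms.map pvH2 ++ [pvH2 b])).set (ms.length + 1) v
        = pvH2 t :: (ms.map pvH2 ++ [v]) := by
    intro v
    rw [List.set_cons_succ, show ms.length = (ms.map pvH2).length by simp, pvSet_last]
  have e_setM2 : ∀ v : List Int,
      (pvH2 t :: (ms.map pvH2 ++ [b.tail])).set (ms.length + 1) v
        = pvH2 t :: (ms.map pvH2 ++ [v]) := by
    intro v
    rw [List.set_cons_succ, show ms.length = (ms.map pvH2).length by simp, pvSet_last]
  have e_btail : pvH2 b ++ [pvH3 b] = b.tail := by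
    simpa [pvH2, pvH3] using pvTail_dropLast_getLastD b (by omega)
  have e_tdrop : pvH1 t :: pvH2 t = t.dropLast := by
    simpa [pvH1, pvH2] using pvHead_cons_tail_dropLast t (by omega)
  simp only [pvStepA, pvDecomp, List.map_cons, List.map_append, List.map_singleton, List.map_nil]
  rw [if_neg hop]
  rw [show ms.length + 2 - 1 = ms.length + 1 by omega]
  rw [e_rb, e_rg1, e_getM (pvH2 b), e_btail, e_setM b.tail, e_getM b.tail,
    e_setM2 b.tail.tail]
  simp only [List.cons_append, List.headD_cons, List.tail_cons, List.getD_cons_zero,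
    List.set_cons_zero]
  rw [e_tdrop]
  simp [pvH1, pvH3, List.append_assoc]

-- reading the state components off the rows built by B's zip
lemma pvZip3_decomp (rs : List (List Int)) (C : Nat) (hC : 2 ≤ C) :
    ∀ (ls rrs : List Int), ls.length = rs.length → rrs.length = rs.length →
      (∀ r ∈ rs, r.length = C) →
      (List.zipWith3 (fun l r rr => l :: (PySem.List.slice r (some 1) (some (-1)) ++ [rr]))
          ls rs rrs).map pvH1 = ls ∧
      (List.zipWith3 (fun l r rr => l :: (PySem.List.slice r (some 1) (some (-1)) ++ [rr]))
          ls rs rrs).map pvH2 = rs.map pvH2 ∧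
      (List.zipWith3 (fun l r rr => l :: (PySem.List.slice r (some 1) (some (-1)) ++ [rr]))
          ls rs rrs).map pvH3 = rrs ∧
      ∀ row ∈ (List.zipWith3 (fun l r rr => l :: (PySem.List.slice r (some 1) (some (-1)) ++ [rr]))
          ls rs rrs), row.length = C := by
  induction rs with
  | nil =>
    intro ls rrs h1 h2 _
    rw [List.length_nil, List.length_eq_zero_iff] at h1 h2
    subst h1; subst h2
    simp [List.zipWith3]
  | cons r rs' ih =>
    intro ls rrs h1 h2 hlen
    cases ls with
    | nil => simp at h1
    | cons l ls' =>
      cases rrs with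
      | nil => simp at h2
      | cons rr rrs' =>
        simp only [List.length_cons, Nat.add_right_cancel_iff] at h1 h2
        have hr : r.length = C := hlen r (by simp)
        have hrest : ∀ x ∈ rs', x.length = C := fun x hx => hlen x (by simp [hx])
        obtain ⟨ih1, ih2, ih3, ih4⟩ := ih ls' rrs' h1 h2 hrest
        have hz : List.zipWith3
            (fun l r rr => l :: (PySem.List.slice r (some 1) (some (-1)) ++ [rr]))
            (l :: ls') (r :: rs') (rr :: rrs')
            = (l :: (PySem.List.slice r (some 1) (some (-1)) ++ [rr]))
              :: List.zipWith3
                (fun l r rr => l :: (PySem.List.slice r (some 1) (some (-1)) ++ [rr]))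
                ls' rs' rrs' := rfl
        rw [hz]
        refine ⟨?_, ?_, ?_, ?_⟩
        · simp only [List.map_cons, ih1]; rfl
        · simp only [List.map_cons, ih2]
          congr 1
          show (PySem.List.slice r (some 1) (some (-1)) ++ [rr]).dropLast = pvH2 r
          rw [List.dropLast_concat, pvSlice_mid]
          rfl
        · simp only [List.map_cons, ih3]
          congr 1
          show (l :: (PySem.List.slice r (some 1) (some (-1)) ++ [rr])).getLastD 0 = rr
          rw [show l :: (PySem.List.slice r (some 1) (some (-1)) ++ [rr])
              = (l :: PySem.List.slice r (some 1) (some (-1))) ++ [rr] by simp,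
            List.getLastD_concat]
        · intro row hrow
          rcases List.mem_cons.mp hrow with rfl | hrow'
          · rw [pvSlice_mid]
            simp only [List.length_cons, List.length_append, List.length_dropLast,
              List.length_tail, List.length_cons, List.length_nil]
            omega
          · exact ih4 row hrow'

-- one loop iteration: the two steps agree through pvDecomp, and B's step preserves the shape
lemma pvStep_eq (op : String) (mat : List (List Int)) (C : Nat) (hC : 2 ≤ C)
    (hR : 2 ≤ mat.length) (hrect : pvRect mat C) :
    pvStepA mat.length (pvDecomp mat) op = pvDecomp (pvStepB mat op) ∧
      (pvStepB mat op).length = mat.length ∧ pvRect (pvStepB mat op) C := by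
  have hne : mat ≠ [] := by intro h; rw [h] at hR; simp at hR
  by_cases hop : PySem.Str.pyGet? op 0 = some 'S'
  · -- S step
    have hB : pvStepB mat op = pvRotR mat := by
      simp only [pvStepB, if_pos hop]
      exact pvStepS_eq mat hne
    refine ⟨?_, ?_, ?_⟩
    · rw [hB]
      simp only [pvStepA, if_pos hop, pvDecomp]
      rw [← pvRotR_map pvH1 mat, ← pvRotR_map pvH2 mat, ← pvRotR_map pvH3 mat]
    · rw [hB, pvRotR_length]
    · rw [hB]
      intro r hr
      exact hrect r (pvRotR_mem mat r hr)
  · -- rotate step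
    cases mat with
    | nil => simp at hne
    | cons t rest =>
      have hrestne : rest ≠ [] := by
        intro h
        rw [h] at hR
        simp at hR
      obtain ⟨ms, b, rfl⟩ : ∃ ms b, rest = ms ++ [b] := by
        rcases List.eq_nil_or_concat rest with h | ⟨l, x, h⟩
        · exact absurd h hrestne
        · exact ⟨l, x, by rw [h, List.concat_eq_append]⟩
      have ht : t.length = C := hrect t (by simp)
      have hb : b.length = C := hrect b (by simp)
      have hms : ∀ r ∈ ms, r.length = C := fun r hr => hrect r (by simp [hr])
      have hB : pvStepB (t :: (ms ++ [b])) op = pvStepBR (t :: (ms ++ [b])) := by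
        simp only [pvStepB, if_neg hop]
      have hA := pvStepAR_eq t b ms C hC ht hb op hop
      cases ms with
      | nil =>
        have hBval := pvStepBR_nil t b C hC ht hb
        have hlen : (t :: (([] : List (List Int)) ++ [b])).length = ([] : List (List Int)).length + 2 := rfl
        have hmat : t :: (([] : List (List Int)) ++ [b]) = [t, b] := rfl
        have hbtne : b.tail ≠ [] := by
          intro h
          have : b.tail.length = 0 := by rw [h]; rfl
          rw [List.length_tail, hb] at this
          omega
        have htdne : t.dropLast ≠ [] := by
          intro h
          have : t.dropLast.length = 0 := by rw [h]; rfl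
          rw [List.length_dropLast, ht] at this
          omega
        refine ⟨?_, ?_, ?_⟩
        · rw [hlen, hA, hB, hmat, hBval]
          simp only [pvDecomp, List.map_cons, List.map_singleton, List.map_nil, List.nil_append]
          refine congrArg₂ Prod.mk ?_ (congrArg₂ Prod.mk ?_ ?_)
          · show _ = [pvH1 (b.headD 0 :: t.dropLast), pvH1 (b.tail ++ [t.getLastD 0])]
            simp only [pvH1, List.headD_cons, pvHeadD_append b.tail _ hbtne, List.map_nil,
              List.nil_append]
          · show _ = [pvH2 (b.headD 0 :: t.dropLast), pvH2 (b.tail ++ [t.getLastD 0])]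
            simp only [pvH2, List.tail_cons, pvTail_append b.tail _ hbtne, List.dropLast_concat]
          · show _ = [pvH3 (b.headD 0 :: t.dropLast), pvH3 (b.tail ++ [t.getLastD 0])]
            simp only [pvH3, List.getLastD_concat, List.getLastD_cons,
              pvGetLastD_ne t.dropLast htdne (b.headD 0) 0]
        · rw [hB, hmat, hBval]; rfl
        · rw [hB, hmat, hBval]
          intro r hr
          rcases List.mem_cons.mp hr with rfl | hr'
          · simp only [List.length_cons, List.length_dropLast, ht]
            omega
          · rcases List.mem_cons.mp hr' with rfl | hr''
            · simp only [List.length_append, List.length_tail, List.length_singleton, hb]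
              omega
            · simp at hr''
      | cons m ms' =>
        have hm : m.length = C := hms m (by simp)
        have hms' : ∀ r ∈ ms', r.length = C := fun r hr => hms r (by simp [hr])
        have hBval := pvStepBR_cons t m b ms' C hC ht hm hb hms'
        have hlen : (t :: ((m :: ms') ++ [b])).length = (m :: ms').length + 2 := by
          simp only [List.length_cons, List.length_append, List.length_singleton,
            List.length_nil]
        obtain ⟨hz1, hz2, hz3, hz4⟩ := pvZip3_decomp (m :: ms') C hC
          (ms'.map pvH1 ++ [b.headD 0]) (t.getLastD 0 :: ((m :: ms').map pvH3).dropLast)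
          (by simp) (by simp) (fun r hr => hms r hr)
        have hbtne : b.tail ≠ [] := by
          intro h
          have : b.tail.length = 0 := by rw [h]; rfl
          rw [List.length_tail, hb] at this
          omega
        have htdne : t.dropLast ≠ [] := by
          intro h
          have : t.dropLast.length = 0 := by rw [h]; rfl
          rw [List.length_dropLast, ht] at this
          omega
        have hmapms_ne : ((m :: ms').map pvH3) ≠ [] := by simp
        refine ⟨?_, ?_, ?_⟩
        · rw [hlen, hA, hB, hBval]
          simp only [List.map_cons] at hz1 hz2 hz3
          simp only [pvDecomp, List.map_cons, List.map_append, List.map_singleton, List.map_nil]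
          rw [hz1, hz2, hz3]
          refine congrArg₂ Prod.mk ?_ (congrArg₂ Prod.mk ?_ ?_)
          · show List.map pvH1 (m :: ms') ++ [b.headD 0, b.tail.headD 0]
              = pvH1 (m.headD 0 :: t.dropLast)
                :: ((ms'.map pvH1 ++ [b.headD 0]) ++ [pvH1 (b.tail ++ [((m :: ms').map pvH3).getLastD 0])])
            simp only [pvH1, List.headD_cons, pvHeadD_append b.tail _ hbtne, List.map_cons]
            simp [List.append_assoc]
          · show t.dropLast.dropLast :: (List.map pvH2 (m :: ms') ++ [b.tail.tail])
              = pvH2 (m.headD 0 :: t.dropLast)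
                :: (List.map pvH2 (m :: ms') ++ [pvH2 (b.tail ++ [((m :: ms').map pvH3).getLastD 0])])
            simp only [pvH2, List.tail_cons, pvTail_append b.tail _ hbtne, List.dropLast_concat]
          · show t.dropLast.getLastD 0 :: t.getLastD 0 :: List.map pvH3 (m :: ms')
              = pvH3 (m.headD 0 :: t.dropLast)
                :: ((t.getLastD 0 :: ((m :: ms').map pvH3).dropLast)
                  ++ [pvH3 (b.tail ++ [((m :: ms').map pvH3).getLastD 0])])
            simp only [pvH3, List.getLastD_concat, List.getLastD_cons,
              pvGetLastD_ne t.dropLast htdne (m.headD 0) 0]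
            rw [List.cons_append]
            congr 2
            exact (pvDropLast_getLastD ((m :: ms').map pvH3) hmapms_ne).symm
        · rw [hB, hBval]
          have hzlen : (List.zipWith3
              (fun l r rr => l :: (PySem.List.slice r (some 1) (some (-1)) ++ [rr]))
              (ms'.map pvH1 ++ [b.headD 0]) (m :: ms')
              (t.getLastD 0 :: ((m :: ms').map pvH3).dropLast)).length = ms'.length + 1 := by
            have := congrArg List.length hz1
            rw [List.length_map] at this
            rw [this]
            simp
          simp only [List.length_cons, List.length_append, hzlen, List.length_singleton]
        · rw [hB, hBval]
          intro r hr
          rcases List.mem_cons.mp hr with rfl | hr'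
          · simp only [List.length_cons, List.length_dropLast, ht]
            omega
          · rcases List.mem_append.mp hr' with hr'' | hr''
            · exact hz4 r hr''
            · rw [List.mem_singleton.mp hr'']
              simp only [List.length_append, List.length_tail, List.length_singleton, hb]
              omega

lemma pvFold_eq (ops : List String) (mat : List (List Int)) (Rn C : Nat) (hC : 2 ≤ C)
    (hR : mat.length = Rn) (hR2 : 2 ≤ Rn) (hrect : pvRect mat C) :
    ops.foldl (pvStepA Rn) (pvDecomp mat) = pvDecomp (ops.foldl pvStepB mat) ∧
      (ops.foldl pvStepB mat).length = Rn ∧ pvRect (ops.foldl pvStepB mat) C := by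
  induction ops generalizing mat with
  | nil => exact ⟨rfl, hR, hrect⟩
  | cons op ops ih =>
    obtain ⟨h1, h2, h3⟩ := pvStep_eq op mat C hC (by omega) hrect
    rw [hR] at h1 h2
    simp only [List.foldl_cons]
    rw [h1]
    exact ih (pvStepB mat op) h2 h3

-- the final reassembly loop of A rebuilds the matrix from its decomposition
lemma pvFinal_eq (mat : List (List Int)) (h : ∀ r ∈ mat, 2 ≤ r.length) :
    (List.range mat.length).map
        (fun i => (mat.map pvH1).getD i 0 :: ((mat.map pvH2).getD i [] ++ [(mat.map pvH3).getD i 0]))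
      = mat := by
  induction mat with
  | nil => simp
  | cons r tl ih =>
    have hr : 2 ≤ r.length := h r (by simp)
    have hrne : r ≠ [] := by intro hh; rw [hh] at hr; simp at hr
    rw [List.length_cons, List.range_succ_eq_map, List.map_cons, List.map_map]
    congr 1
    · simp only [List.map_cons, List.getD_cons_zero]
      show pvH1 r :: (pvH2 r ++ [pvH3 r]) = r
      rw [show (pvH2 r ++ [pvH3 r] : List Int) = r.tail from by
          simpa [pvH2, pvH3] using pvTail_dropLast_getLastD r hr]
      exact pvHeadD_cons_tail r hrne
    · rw [show ((fun i => (List.map pvH1 (r :: tl)).getD i 0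
            :: ((List.map pvH2 (r :: tl)).getD i [] ++ [(List.map pvH3 (r :: tl)).getD i 0]))
          ∘ (fun i => i + 1))
          = fun i => (List.map pvH1 tl).getD i 0
            :: ((List.map pvH2 tl).getD i [] ++ [(List.map pvH3 tl).getD i 0]) from by
        funext i
        simp [List.getD_cons_succ]]
      exact ih (fun x hx => h x (by simp [hx]))

-- the initial state of A is the decomposition of rc
lemma pvInit_eq (rc : List (List Int)) (C : Nat) (hC : 2 ≤ C) (hrect : pvRect rc C)
    (hhead : (rc.headD []).length = C) :
    (rc.map (fun row => PySem.List.pyGetD row 0 0),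
     rc.map (fun row => PySem.List.slice row (some 1) (some (-1))),
     rc.map (fun row => PySem.List.pyGetD row (((rc.headD []).length : Int) - 1) 0)) = pvDecomp rc := by
  unfold pvDecomp
  refine congrArg₂ Prod.mk ?_ (congrArg₂ Prod.mk ?_ ?_)
  · exact List.map_congr_left (fun r _ => pvPyGetD_zero r)
  · exact List.map_congr_left (fun r _ => by rw [pvSlice_mid]; rfl)
  · refine List.map_congr_left (fun r hr => ?_)
    have hrC : r.length = C := hrect r hr
    have hrne : r ≠ [] := by intro hh; rw [hh] at hrC; simp at hrC; omega
    rw [hhead, show ((C : Int) - 1) = ((C - 1 : Nat) : Int) from by omega,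
      PySem.List.pyGetD_natCast, ← hrC, pvGetD_len_sub_one r hrne]
    rfl

-- on a single row, every shift step of A fixes the decomposed state
lemma pvOnlyS_A (ops : List String) (L : List Int) (M : List (List Int)) (Rg : List Int)
    (h : ∀ op ∈ ops, PySem.Str.pyGet? op 0 = some 'S')
    (h1 : L.length = 1) (h2 : M.length = 1) (h3 : Rg.length = 1) :
    ops.foldl (pvStepA 1) (L, M, Rg) = (L, M, Rg) := by
  obtain ⟨a, rfl⟩ := List.length_eq_one_iff.mp h1
  obtain ⟨m, rfl⟩ := List.length_eq_one_iff.mp h2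
  obtain ⟨c, rfl⟩ := List.length_eq_one_iff.mp h3
  induction ops with
  | nil => rfl
  | cons op ops ih =>
    have hstep : pvStepA 1 (([a], [m], [c]) : List Int × List (List Int) × List Int) op
        = ([a], [m], [c]) := by
      simp only [pvStepA, if_pos (h op (by simp))]
      rfl
    rw [List.foldl_cons, hstep]
    exact ih (fun op hop => h op (by simp [hop]))

-- on a single row, every shift step of B fixes the matrix
lemma pvOnlyS_B (ops : List String) (t : List Int)
    (h : ∀ op ∈ ops, PySem.Str.pyGet? op 0 = some 'S') :
    ops.foldl pvStepB [t] = [t] := by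
  induction ops with
  | nil => rfl
  | cons op ops ih =>
    have hstep : pvStepB [t] op = [t] := by
      simp only [pvStepB, if_pos (h op (by simp))]
      rw [pvStepS_eq [t] (by simp)]
      rfl
    rw [List.foldl_cons, hstep]
    exact ih (fun op hop => h op (by simp [hop]))

-- ===== VERDICT (by name: the statement is the Claim_ definition above) =====
theorem solution_spec : Claim_equal_solution := by
  intro rc operations _hdom hpre
  obtain ⟨hC, hrect, _hops, hcase⟩ := hpre
  unfold Spec_solution solution solution_alt
  dsimp only
  have hcopy : rc.map (fun row => row) = rc := by simp
  rw [hcopy]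
  have hrect' : pvRect rc ((rc.headD []).length) := fun r hr => hrect r hr
  rw [pvInit_eq rc ((rc.headD []).length) hC hrect' rfl]
  rcases hcase with hR | ⟨hR1, hS⟩
  · obtain ⟨hfold, hlen, hrect2⟩ :=
      pvFold_eq operations rc rc.length ((rc.headD []).length) hC rfl hR hrect'
    rw [hfold, ← hlen]
    exact pvFinal_eq _ (fun r hr => by rw [hrect2 r hr]; exact hC)
  · obtain ⟨t, rfl⟩ := List.length_eq_one_iff.mp hR1
    rw [show [t].length = 1 from rfl,
      show pvDecomp [t] = (([pvH1 t], [pvH2 t], [pvH3 t])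
        : List Int × List (List Int) × List Int) from rfl,
      pvOnlyS_A operations [pvH1 t] [pvH2 t] [pvH3 t] hS rfl rfl rfl,
      pvOnlyS_B operations t hS]
    exact pvFinal_eq [t] (fun r hr => by
      rw [List.mem_singleton.mp hr, hrect t (by simp)]
      exact hC)
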